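-- pv_equiv track=rewrite | github.com/tarou640/covid-report-pdf | parse_tokyo_covid_report.py | extract_24_values
-- ===== SOURCE A (Python) =====
-- def extract_24_values(html, keyword):
--     td_tag = '<TD class="padright">'
--     end_tag = '</TD>'
--
--     start_pos = html.find(keyword)
--     if start_pos == -1:
--         return f"{keyword}/(キーワード未検出)"
--
--     values = []
--     search_pos = start_pos
--
--     for i in range(24):
--         td_start = html.find(td_tag, search_pos)
--         if td_start == -1:
--             values.append("0")
--             break
--
--         td_end = html.find(end_tag, td_start + len(td_tag))
--         if td_end == -1:
--             values.append("0")
--             break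
--
--         value = html[td_start + len(td_tag):td_end].strip()
--         if not value:
--             value = "0"
--
--         values.append(value)
--         search_pos = td_end + len(end_tag)
--
--     # 足りない値は 0 で補完
--     while len(values) < 24:
--         values.append("0")
--
--     return f"{keyword}/" + "/".join(values)
-- ===== SOURCE B (Python) =====
-- TD_TAG = '<TD class="padright">'
-- END_TAG = '</TD>'
--
-- def extract_24_values(html, keyword):
--     start = html.find(keyword)
--     if start == -1:
--         return f"{keyword}/(キーワード未検出)"
--     # staged pipeline: split the tail into closed </TD>-terminated segments,
--     # then extract one value per segment that carries the opening tag
--     segments = html[start:].split(END_TAG)[:-1]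
--     values = [(seg.split(TD_TAG, 1)[1].strip() or "0")
--               for seg in segments if TD_TAG in seg][:24]
--     values += ["0"] * (24 - len(values))
--     return keyword + "/" + "/".join(values)
-- ===== Notes on version B (the rewrite author's own statement) =====
-- stated objective: alternative
-- what changed: B replaces A's single sequential cursor loop (24 iterations of paired html.find calls with a moving search_pos) by a staged pipeline: split the tail once on '</TD>' into closed segments, then a comprehension extracts one value per segment containing the opening tag, truncated to 24 and padded.
import Mathlib
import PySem

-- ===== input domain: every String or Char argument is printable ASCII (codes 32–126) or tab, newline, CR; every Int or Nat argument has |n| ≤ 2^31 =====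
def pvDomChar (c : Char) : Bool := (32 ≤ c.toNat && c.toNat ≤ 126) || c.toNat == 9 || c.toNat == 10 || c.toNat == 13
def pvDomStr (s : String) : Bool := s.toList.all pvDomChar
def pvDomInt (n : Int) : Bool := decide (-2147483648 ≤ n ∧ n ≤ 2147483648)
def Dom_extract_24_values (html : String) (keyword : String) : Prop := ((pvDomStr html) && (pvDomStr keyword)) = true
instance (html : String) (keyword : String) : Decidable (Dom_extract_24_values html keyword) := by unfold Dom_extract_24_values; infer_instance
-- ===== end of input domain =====

-- B replaces A's sequential cursor loop (paired find calls moving a search_pos) by a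
-- staged pipeline: split once on '</TD>', extract per closed segment, truncate, pad
-- (objective: alternative; same cost).

-- ===== PORT A =====
-- A's for-loop over range(24) with break, carrying (values, search_pos); fuel = remaining iterations
def pvLoopA (s tdTag endTag : List Char) (values : List (List Char)) (searchPos : Int) : Nat → List (List Char)
  | 0 => values
  | n+1 =>
    let tdStart := PySem.Chars.findFrom s tdTag searchPos none
    if tdStart = -1 then values ++ [['0']]
    else
      let tdEnd := PySem.Chars.findFrom s endTag (tdStart + tdTag.length) none
      if tdEnd = -1 then values ++ [['0']]
      else
        let value := PySem.Chars.strip (PySem.Chars.slice s (some (tdStart + tdTag.length)) (some tdEnd))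
        let value := if value = [] then ['0'] else value
        pvLoopA s tdTag endTag (values ++ [value]) (tdEnd + endTag.length) n

def extract_24_values (html : String) (keyword : String) : String :=
  let tdTag := "<TD class=\"padright\">".toList
  let endTag := "</TD>".toList
  let startPos := PySem.Chars.find html.toList keyword.toList
  if startPos = -1 then String.ofList (keyword.toList ++ "/(キーワード未検出)".toList)
  else
    let values := pvLoopA html.toList tdTag endTag [] startPos 24
    -- while len(values) < 24: values.append("0")
    let values := values ++ List.replicate (24 - values.length) ['0']
    String.ofList (keyword.toList ++ ['/'] ++ PySem.Chars.join ['/'] values)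

-- ===== PORT B =====
def pvTdTag : List Char := "<TD class=\"padright\">".toList
def pvEndTag : List Char := "</TD>".toList

-- termination fact for pvSplitEnd (cited by its decreasing_by)
theorem pvSplitEnd_dec (s : List Char) (he : ¬ PySem.Chars.find s pvEndTag = -1) :
    (s.drop ((PySem.Chars.find s pvEndTag).toNat + pvEndTag.length)).length < s.length := by
  have h0 : 0 ≤ PySem.Chars.find s pvEndTag := by
    have := PySem.Chars.neg_one_le_find s pvEndTag; omega
  have h1 := (PySem.Chars.find_spec h0).1.length_le
  have h2 : pvEndTag.length = 5 := by decide
  simp [List.length_drop] at h1 ⊢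
  omega

-- hand port of s.split('</TD>') for this NONEMPTY separator: Python's split takes
-- leftmost non-overlapping occurrences, i.e. cut at the first occurrence and recurse — exact
def pvSplitEnd (s : List Char) : List (List Char) :=
  if he : PySem.Chars.find s pvEndTag = -1 then [s]
  else
    s.take (PySem.Chars.find s pvEndTag).toNat ::
      pvSplitEnd (s.drop ((PySem.Chars.find s pvEndTag).toNat + pvEndTag.length))
termination_by s.length
decreasing_by exact pvSplitEnd_dec s he

-- body of B's comprehension: 'seg.split(TD_TAG, 1)[1].strip() or "0"' guarded by 'TD_TAG in seg';
-- seg.split(sep, 1)[1] with sep present is exactly the text after the first occurrence — exact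
def pvValue (seg : List Char) : Option (List Char) :=
  if PySem.Chars.isIn pvTdTag seg then
    let v := PySem.Chars.strip (seg.drop ((PySem.Chars.find seg pvTdTag).toNat + pvTdTag.length))
    some (if v = [] then ['0'] else v)
  else none

def extract_24_values_alt (html : String) (keyword : String) : String :=
  let start := PySem.Chars.find html.toList keyword.toList
  if start = -1 then String.ofList (keyword.toList ++ "/(キーワード未検出)".toList)
  else
    -- segments = html[start:].split(END_TAG)[:-1]   ([:-1] = dropLast, exact)
    let segments := (pvSplitEnd (PySem.Chars.slice html.toList (some start) none)).dropLast
    -- values = [ … for seg in segments if TD_TAG in seg][:24]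
    let vals := (segments.filterMap pvValue).take 24
    let vals := vals ++ List.replicate (24 - vals.length) ['0']
    String.ofList ((keyword.toList ++ ['/']) ++ PySem.Chars.join ['/'] vals)

-- ===== PRECONDITION & SPEC =====
def Spec_extract_24_values (html : String) (keyword : String) (out : String) : Prop := out = extract_24_values_alt html keyword
instance (html : String) (keyword : String) (out : String) : Decidable (Spec_extract_24_values html keyword out) := by unfold Spec_extract_24_values; infer_instance

-- ===== CLAIM (what is proved, stated in full; the proofs are below) =====
def Claim_equal_extract_24_values : Prop := ∀ (html : String) (keyword : String), Dom_extract_24_values html keyword → Spec_extract_24_values html keyword (extract_24_values html keyword)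

-- ===== LEMMAS AND PROOFS =====

-- proof-layer sequential intermediate: A's loop, rebased onto the suffix (str.partition shape)
def pvPartition (s sep : List Char) : List Char × List Char × List Char :=
  let i := PySem.Chars.find s sep
  if i = -1 then (s, [], []) else (s.take i.toNat, sep, s.drop (i.toNat + sep.length))

def pvCollectB (rest : List Char) : Nat → List (List Char)
  | 0 => []
  | n+1 =>
    let p := pvPartition rest pvTdTag
    if p.2.1 = [] then []
    else
      let q := pvPartition p.2.2 pvEndTag
      if q.2.1 = [] then []
      else
        let v := PySem.Chars.strip q.1
        (if v = [] then ['0'] else v) :: pvCollectB q.2.2 n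

def pvVal0 (x : List Char) : List Char :=
  let v := PySem.Chars.strip x
  if v = [] then ['0'] else v

def pvF (rest : List Char) : List (List Char) :=
  (pvSplitEnd rest).dropLast.filterMap pvValue

theorem pvLoopA_acc (s tdTag endTag : List Char) :
    ∀ (n : Nat) (v : List (List Char)) (p : Int),
      pvLoopA s tdTag endTag v p n = v ++ pvLoopA s tdTag endTag [] p n := by
  intro n
  induction n with
  | zero => intro v p; simp [pvLoopA]
  | succ n ih =>
    intro v p
    simp only [pvLoopA]
    split_ifs with h1 h2 h3
    · simp
    · simp
    · conv_lhs => rw [ih]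
      conv_rhs => rw [ih]
      simp
    · conv_lhs => rw [ih]
      conv_rhs => rw [ih]
      simp

theorem pvTd_ne_nil : pvTdTag ≠ [] := by decide

theorem pvEnd_ne_nil : pvEndTag ≠ [] := by decide

theorem pvKey :
    ∀ (n : Nat) (k : Nat) (s : List Char), k ≤ s.length →
      (pvLoopA s pvTdTag pvEndTag [] (k : Int) n = pvCollectB (s.drop k) n ∨
       pvLoopA s pvTdTag pvEndTag [] (k : Int) n = pvCollectB (s.drop k) n ++ [['0']]) ∧
      (pvCollectB (s.drop k) n).length ≤ n ∧
      (pvLoopA s pvTdTag pvEndTag [] (k : Int) n).length ≤ n := by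
  intro n
  induction n with
  | zero => intro k s hk; simp [pvLoopA, pvCollectB]
  | succ n ih =>
    intro k s hk
    simp only [pvLoopA, pvCollectB]
    rw [PySem.Chars.findFrom_natCast s pvTdTag k hk]
    by_cases hf : PySem.Chars.find (s.drop k) pvTdTag = -1
    · -- first td search fails
      simp [hf, pvPartition]
    · have hf0 : 0 ≤ PySem.Chars.find (s.drop k) pvTdTag := by
        have := PySem.Chars.neg_one_le_find (s.drop k) pvTdTag; omega
      set i : Nat := (PySem.Chars.find (s.drop k) pvTdTag).toNat with hi
      have hfi : PySem.Chars.find (s.drop k) pvTdTag = (i : Int) := by omega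
      have hik : k + i ≤ s.length := by
        have h1 := PySem.Chars.find_le_length (s.drop k) pvTdTag
        have h2 : (s.drop k).length = s.length - k := by simp
        rw [h2] at h1
        omega
      have hpre : pvTdTag <+: s.drop (k + i) := by
        have h1 := (PySem.Chars.find_spec hf0).1
        rw [hfi] at h1
        simpa [List.drop_drop, Nat.add_comm] using h1
      have hki : k + i + pvTdTag.length ≤ s.length := by
        have h1 := hpre.length_le
        simp [List.length_drop] at h1
        omega
      -- A's first find, as a single cast
      have hA1 : (if PySem.Chars.find (s.drop k) pvTdTag = -1 then -1
            else (k : Int) + PySem.Chars.find (s.drop k) pvTdTag) = ((k + i : Nat) : Int) := by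
        rw [if_neg hf, hfi]; push_cast; ring
      have hm1 : ((k + i : Nat) : Int) + (pvTdTag.length : Int)
          = ((k + i + pvTdTag.length : Nat) : Int) := by push_cast; ring
      have hc1 : ¬ (((k + i : Nat) : Int) = -1) := by omega
      -- B's first partition
      have hpart1 : pvPartition (s.drop k) pvTdTag
          = ((s.drop k).take i, pvTdTag, (s.drop k).drop (i + pvTdTag.length)) := by
        simp [pvPartition, hfi]
      have htail : (s.drop k).drop (i + pvTdTag.length) = s.drop (k + i + pvTdTag.length) := by
        rw [List.drop_drop]; congr 1
      by_cases hg : PySem.Chars.find (s.drop (k + i + pvTdTag.length)) pvEndTag = -1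
      · -- end tag not found
        have hA2 : PySem.Chars.findFrom s pvEndTag
            ((k + i + pvTdTag.length : Nat) : Int) none = -1 := by
          rw [PySem.Chars.findFrom_natCast s pvEndTag _ hki, if_pos hg]
        simp only [hA1, hm1, if_neg hc1, hA2, hpart1, htail]
        simp [pvPartition, hg, pvTd_ne_nil]
      · have hg0 : 0 ≤ PySem.Chars.find (s.drop (k + i + pvTdTag.length)) pvEndTag := by
          have := PySem.Chars.neg_one_le_find (s.drop (k + i + pvTdTag.length)) pvEndTag; omega
        set j : Nat := (PySem.Chars.find (s.drop (k + i + pvTdTag.length)) pvEndTag).toNat with hj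
        have hgj : PySem.Chars.find (s.drop (k + i + pvTdTag.length)) pvEndTag = (j : Int) := by omega
        have hjk : k + i + pvTdTag.length + j ≤ s.length := by
          have h1 := PySem.Chars.find_le_length (s.drop (k + i + pvTdTag.length)) pvEndTag
          have h2 : (s.drop (k + i + pvTdTag.length)).length
              = s.length - (k + i + pvTdTag.length) := by simp
          rw [h2] at h1
          omega
        have hpre2 : pvEndTag <+: s.drop (k + i + pvTdTag.length + j) := by
          have h1 := (PySem.Chars.find_spec hg0).1
          rw [hgj] at h1
          simpa [List.drop_drop, Nat.add_comm] using h1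
        have hkj : k + i + pvTdTag.length + j + pvEndTag.length ≤ s.length := by
          have h1 := hpre2.length_le
          simp [List.length_drop] at h1
          omega
        have hA2 : PySem.Chars.findFrom s pvEndTag ((k + i + pvTdTag.length : Nat) : Int) none
            = ((k + i + pvTdTag.length + j : Nat) : Int) := by
          rw [PySem.Chars.findFrom_natCast s pvEndTag _ hki, if_neg hg, hgj]; push_cast; ring
        have hc2 : ¬ (((k + i + pvTdTag.length + j : Nat) : Int) = -1) := by omega
        have hm2 : ((k + i + pvTdTag.length + j : Nat) : Int) + (pvEndTag.length : Int)
            = ((k + i + pvTdTag.length + j + pvEndTag.length : Nat) : Int) := by push_cast; ring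
        have hslice : PySem.Chars.slice s (some ((k + i + pvTdTag.length : Nat) : Int))
              (some ((k + i + pvTdTag.length + j : Nat) : Int))
            = (s.drop (k + i + pvTdTag.length)).take j := by
          rw [PySem.Chars.slice_eq_listSlice]
          have h1 : ((k + i + pvTdTag.length + j : Nat) : Int)
              = ((k + i + pvTdTag.length : Nat) : Int) + (j : Int) := by push_cast; ring
          rw [h1, PySem.List.slice_natCast_add]
        have hpart2 : pvPartition (s.drop (k + i + pvTdTag.length)) pvEndTag
            = ((s.drop (k + i + pvTdTag.length)).take j, pvEndTag,
               (s.drop (k + i + pvTdTag.length)).drop (j + pvEndTag.length)) := by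
          simp [pvPartition, hgj]
        have htail2 : (s.drop (k + i + pvTdTag.length)).drop (j + pvEndTag.length)
            = s.drop (k + i + pvTdTag.length + j + pvEndTag.length) := by
          rw [List.drop_drop]; congr 1
        have hIH := ih (k + i + pvTdTag.length + j + pvEndTag.length) s hkj
        simp only [hA1, hm1, hA2, hm2, hslice, hpart1, htail, hpart2, htail2,
          if_neg hc1, if_neg hc2, if_neg pvTd_ne_nil, if_neg pvEnd_ne_nil,
          List.nil_append]
        rw [pvLoopA_acc]
        obtain ⟨hIH1 | hIH1, hIH2, hIH3⟩ := hIH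
        · rw [hIH1]
          refine ⟨Or.inl (by simp), by simp; omega, by simp; omega⟩
        · rw [hIH1] at hIH3 ⊢
          simp only [List.length_append, List.length_cons] at hIH3
          refine ⟨Or.inr (by simp), by simp; omega, by simp; omega⟩

theorem pvPad (l : List (List Char)) (hl : l.length + 1 ≤ 24) :
    (l ++ [['0']]) ++ List.replicate (24 - (l ++ [['0']]).length) ['0']
      = l ++ List.replicate (24 - l.length) ['0'] := by
  have h24 : 24 - l.length = (24 - (l.length + 1)) + 1 := by omega
  simp [h24, List.replicate_succ]

-- an occurrence (as prefix of a drop) is an infix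
theorem pvInfix_of_prefix_drop {sub s : List Char} {j : Nat} (h : sub <+: s.drop j) :
    sub <:+: s :=
  h.isInfix.trans (List.drop_suffix j s).isInfix

-- occurrence inside a take is an occurrence in the whole list, within the first m chars
theorem pvOcc_of_take {sub s : List Char} {j m : Nat} (hsub : sub ≠ [])
    (h : sub <+: (s.take m).drop j) :
    sub <+: s.drop j ∧ j + sub.length ≤ m := by
  have hpos : 0 < sub.length := List.length_pos_of_ne_nil hsub
  have he : (s.take m).drop j = (s.drop j).take (m - j) := by
    rw [List.drop_take]
  rw [he] at h
  constructor
  · exact h.trans (List.take_prefix _ _)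
  · have := h.length_le
    simp [List.length_take] at this
    omega

-- conversely, an occurrence ending within the first m chars is an occurrence in the take
theorem pvOcc_into_take {sub s : List Char} {j m : Nat}
    (h : sub <+: s.drop j) (hm : j + sub.length ≤ m) :
    sub <+: (s.take m).drop j := by
  have he : (s.take m).drop j = (s.drop j).take (m - j) := by
    rw [List.drop_take]
  rw [he, List.prefix_take_iff]
  exact ⟨h, by omega⟩

-- find equals i when there is an occurrence at i and none before it
theorem pvFindEq (s sub : List Char) (i : Nat)
    (h1 : sub <+: s.drop i) (h2 : ∀ j, j < i → ¬ sub <+: s.drop j) :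
    PySem.Chars.find s sub = (i : Int) := by
  have hinf : sub <:+: s := pvInfix_of_prefix_drop h1
  have h0 : 0 ≤ PySem.Chars.find s sub := (PySem.Chars.find_nonneg_iff s sub).2 hinf
  obtain ⟨hp, hmin⟩ := PySem.Chars.find_spec h0
  rcases Nat.lt_trichotomy (PySem.Chars.find s sub).toNat i with h | h | h
  · exact absurd hp (h2 _ h)
  · omega
  · exact absurd h1 (hmin _ h)

-- the two tags never overlap: occurrences are ≥ 5 apart (END first) or ≥ 21 apart (TD first)
theorem pvSep {s : List Char} {i p : Nat}
    (h1 : pvTdTag <+: s.drop i) (h2 : pvEndTag <+: s.drop p) :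
    p + 5 ≤ i ∨ i + 21 ≤ p := by
  have h21 : pvTdTag.length = 21 := by decide
  have h5 : pvEndTag.length = 5 := by decide
  by_contra hc
  push_neg at hc
  obtain ⟨hc1, hc2⟩ := hc
  have hlT : i + 21 ≤ s.length := by
    have := h1.length_le
    simp [List.length_drop] at this
    omega
  have hlE : p + 5 ≤ s.length := by
    have := h2.length_le
    simp [List.length_drop] at this
    omega
  have hT : ∀ (j : Nat), j < 21 → ∀ (hs : i + j < s.length) (ht : j < pvTdTag.length),
      s[i + j]'hs = pvTdTag[j]'ht := by
    intro j hj hs ht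
    have := h1.getElem (i := j) ht
    simpa [List.getElem_drop] using this.symm
  have hE : ∀ (j : Nat), j < 5 → ∀ (hs : p + j < s.length) (ht : j < pvEndTag.length),
      s[p + j]'hs = pvEndTag[j]'ht := by
    intro j hj hs ht
    have := h2.getElem (i := j) ht
    simpa [List.getElem_drop] using this.symm
  rcases Nat.lt_or_ge p i with h | h
  · -- END starts 1..4 chars before TD: TD's leading '<' hits a non-'<' END char
    have e1 := hT 0 (by omega) (by omega) (by omega)
    have e2 := hE (i - p) (by omega) (by omega) (by omega)
    have e3 : pvTdTag[0]'(by omega) = pvEndTag[i - p]'(by omega) := by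
      rw [← e1, ← e2]
      congr 1
      omega
    have hlt : pvTdTag[0]'(by decide) = '<' := by decide
    have e4 : pvEndTag[i - p]? = some '<' := by
      rw [List.getElem?_eq_getElem (by omega)]
      exact congrArg some (Eq.trans e3.symm hlt)
    set o := i - p with ho
    have ho1 : 1 ≤ o := by omega
    have ho2 : o ≤ 4 := by omega
    interval_cases o <;> exact absurd e4 (by decide)
  · rcases Nat.eq_or_lt_of_le h with h' | h'
    · -- same position: second char differs ('T' vs '/')
      have e1 := hT 1 (by omega) (by omega) (by omega)
      have e2 := hE 1 (by omega) (by omega) (by omega)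
      have e3 : pvTdTag[1]'(by omega) = pvEndTag[1]'(by omega) := by
        rw [← e1, ← e2]
        congr 1
        omega
      have e4 : (pvTdTag[1]? : Option Char) = pvEndTag[1]? := by
        rw [List.getElem?_eq_getElem (by decide), List.getElem?_eq_getElem (by decide)]
        exact congrArg some e3
      exact absurd e4 (by decide)
    · -- END starts 1..20 chars inside TD: its '<' hits a non-'<' TD char
      have e1 := hT (p - i) (by omega) (by omega) (by omega)
      have e2 := hE 0 (by omega) (by omega) (by omega)
      have e3 : pvTdTag[p - i]'(by omega) = pvEndTag[0]'(by omega) := by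
        rw [← e1, ← e2]
        congr 1
        omega
      have hlt : pvEndTag[0]'(by decide) = '<' := by decide
      have e4 : pvTdTag[p - i]? = some '<' := by
        rw [List.getElem?_eq_getElem (by omega)]
        exact congrArg some (Eq.trans e3 hlt)
      set o := p - i with ho
      have ho1 : 1 ≤ o := by omega
      have ho2 : o ≤ 20 := by omega
      interval_cases o <;> exact absurd e4 (by decide)

theorem pvSplitEnd_ne_nil (s : List Char) : pvSplitEnd s ≠ [] := by
  rw [pvSplitEnd]
  split_ifs <;> simp

-- if no TD occurrence is (disjointly) followed by an END occurrence, B extracts nothing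
theorem pvF_nil : ∀ (N : Nat) (rest : List Char), rest.length ≤ N →
    (∀ p q, pvTdTag <+: rest.drop p → p + 21 ≤ q → ¬ pvEndTag <+: rest.drop q) →
    pvF rest = [] := by
  intro N
  induction N with
  | zero =>
    intro rest hlen _
    unfold pvF
    rw [pvSplitEnd]
    split_ifs with he
    · simp
    · exfalso
      have h0 : 0 ≤ PySem.Chars.find rest pvEndTag := by
        have := PySem.Chars.neg_one_le_find rest pvEndTag; omega
      have h1 := (PySem.Chars.find_spec h0).1.length_le
      have h5 : pvEndTag.length = 5 := by decide
      simp [List.length_drop] at h1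
      omega
  | succ N ih =>
    intro rest hlen hcond
    unfold pvF
    rw [pvSplitEnd]
    split_ifs with he
    · simp
    · have h0 : 0 ≤ PySem.Chars.find rest pvEndTag := by
        have := PySem.Chars.neg_one_le_find rest pvEndTag; omega
      set e : Nat := (PySem.Chars.find rest pvEndTag).toNat with hedef
      have hEocc : pvEndTag <+: rest.drop e := (PySem.Chars.find_spec h0).1
      have h5 : pvEndTag.length = 5 := by decide
      have h21 : pvTdTag.length = 21 := by decide
      have hel : e + 5 ≤ rest.length := by
        have := hEocc.length_le
        simp [List.length_drop] at this
        omega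
      have hnz : pvSplitEnd (rest.drop (e + pvEndTag.length)) ≠ [] :=
        pvSplitEnd_ne_nil _
      rw [List.dropLast_cons_of_ne_nil hnz, List.filterMap_cons]
      have hval : pvValue (rest.take e) = none := by
        unfold pvValue
        rw [if_neg]
        intro hIn
        obtain ⟨j, hj⟩ := (PySem.Chars.exists_prefix_drop_iff_isIn pvTdTag (rest.take e)).2 hIn
        obtain ⟨hj1, hj2⟩ := pvOcc_of_take pvTd_ne_nil hj
        exact hcond j e hj1 (by omega) hEocc
      rw [hval]
      apply ih
      · simp [List.length_drop]; omega
      · intro p q hp hq hEq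
        have hp' : pvTdTag <+: rest.drop (e + pvEndTag.length + p) := by
          rw [← List.drop_drop]; exact hp
        have hq' : pvEndTag <+: rest.drop (e + pvEndTag.length + q) := by
          rw [← List.drop_drop]; exact hEq
        exact hcond _ _ hp' (by omega) hq'

-- occurrence + minimality packaged from a find equation
theorem pvFindSpec (s sub : List Char) (i : Nat) (h : PySem.Chars.find s sub = (i : Int)) :
    sub <+: s.drop i ∧ ∀ j, j < i → ¬ sub <+: s.drop j := by
  have h0 : 0 ≤ PySem.Chars.find s sub := by rw [h]; exact Int.natCast_nonneg i
  obtain ⟨h1, h2⟩ := PySem.Chars.find_spec h0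
  have ht : (PySem.Chars.find s sub).toNat = i := by omega
  rw [ht] at h1 h2
  exact ⟨h1, h2⟩

theorem pvDropDrop (s : List Char) (a b c : Nat) (h : a + b = c) :
    (s.drop a).drop b = s.drop c := by
  rw [List.drop_drop]
  congr 1

-- key segment step: with first TD at i and first END after it at offset g,
-- B's pipeline yields exactly the value A would cut, then continues past that END
theorem pvF_cons : ∀ (N : Nat) (rest : List Char) (i g : Nat), rest.length ≤ N →
    PySem.Chars.find rest pvTdTag = (i : Int) →
    PySem.Chars.find (rest.drop (i + 21)) pvEndTag = (g : Int) →
    pvF rest = pvVal0 ((rest.drop (i + 21)).take g) :: pvF (rest.drop (i + 21 + g + 5)) := by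
  intro N
  induction N with
  | zero =>
    intro rest i g hlen hfi _
    exfalso
    obtain ⟨hTocc, _⟩ := pvFindSpec rest pvTdTag i hfi
    have h21 : pvTdTag.length = 21 := by decide
    have := hTocc.length_le
    simp [List.length_drop] at this
    omega
  | succ N ih =>
    intro rest i g hlen hfi hfg
    have h21 : pvTdTag.length = 21 := by decide
    have h5 : pvEndTag.length = 5 := by decide
    obtain ⟨hTocc, hTmin⟩ := pvFindSpec rest pvTdTag i hfi
    obtain ⟨hgocc, hgmin⟩ := pvFindSpec (rest.drop (i + 21)) pvEndTag g hfg
    have hEocc : pvEndTag <+: rest.drop (i + 21 + g) := by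
      rw [← pvDropDrop rest (i + 21) g (i + 21 + g) rfl]
      exact hgocc
    have hEinf : pvEndTag <:+: rest := pvInfix_of_prefix_drop hEocc
    have h0e : 0 ≤ PySem.Chars.find rest pvEndTag :=
      (PySem.Chars.find_nonneg_iff rest pvEndTag).2 hEinf
    set e : Nat := (PySem.Chars.find rest pvEndTag).toNat with hedef
    have hfe : PySem.Chars.find rest pvEndTag = (e : Int) := by omega
    clear_value e
    obtain ⟨hEoccE, hEminE⟩ := pvFindSpec rest pvEndTag e hfe
    have hne : ¬ PySem.Chars.find rest pvEndTag = -1 := by omega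
    have heub : e ≤ i + 21 + g := by
      by_contra h'
      exact hEminE (i + 21 + g) (by omega) hEocc
    have hTlen : i + 21 ≤ rest.length := by
      have := hTocc.length_le
      simp [List.length_drop] at this
      omega
    -- unfold one pvSplitEnd step
    unfold pvF
    rw [pvSplitEnd, dif_neg hne]
    rw [List.dropLast_cons_of_ne_nil (pvSplitEnd_ne_nil _)]
    have htoe : (PySem.Chars.find rest pvEndTag).toNat = e := by omega
    rw [htoe, h5]
    rcases pvSep hTocc hEoccE with hlt | hge
    · -- an END closes a segment before the TD: that segment carries no value, recurse
      have hvalnone : pvValue (rest.take e) = none := by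
        unfold pvValue
        rw [if_neg]
        intro hIn
        obtain ⟨j, hj⟩ := (PySem.Chars.exists_prefix_drop_iff_isIn pvTdTag (rest.take e)).2 hIn
        obtain ⟨hj1, hj2⟩ := pvOcc_of_take pvTd_ne_nil hj
        exact hTmin j (by omega) hj1
      rw [List.filterMap_cons_none hvalnone]
      have hfi' : PySem.Chars.find (rest.drop (e + 5)) pvTdTag = ((i - (e + 5) : Nat) : Int) := by
        apply pvFindEq
        · rw [pvDropDrop rest (e + 5) (i - (e + 5)) i (by omega)]
          exact hTocc
        · intro j hj hocc
          rw [pvDropDrop rest (e + 5) j (e + 5 + j) rfl] at hocc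
          exact hTmin (e + 5 + j) (by omega) hocc
      have hfg' : PySem.Chars.find ((rest.drop (e + 5)).drop (i - (e + 5) + 21)) pvEndTag
          = (g : Int) := by
        rw [pvDropDrop rest (e + 5) (i - (e + 5) + 21) (i + 21) (by omega)]
        exact hfg
      have hlen' : (rest.drop (e + 5)).length ≤ N := by
        rw [List.length_drop]
        omega
      have := ih (rest.drop (e + 5)) (i - (e + 5)) g hlen' hfi' hfg'
      unfold pvF at this
      rw [this]
      congr 2
      · rw [pvDropDrop rest (e + 5) (i - (e + 5) + 21) (i + 21) (by omega)]
      · rw [pvDropDrop rest (e + 5) (i - (e + 5) + 21 + g + 5) (i + 21 + g + 5) (by omega)]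
    · -- first END at/after the TD: it is exactly the one closing this value's segment
      have heq : e = i + 21 + g := by
        by_contra h'
        have hlt2 : e - (i + 21) < g := by omega
        have : pvEndTag <+: (rest.drop (i + 21)).drop (e - (i + 21)) := by
          rw [pvDropDrop rest (i + 21) (e - (i + 21)) e (by omega)]
          exact hEoccE
        exact hgmin (e - (i + 21)) hlt2 this
      have hocc_take : pvTdTag <+: (rest.take e).drop i :=
        pvOcc_into_take hTocc (by omega)
      have hIn : PySem.Chars.isIn pvTdTag (rest.take e) = true :=
        (PySem.Chars.exists_prefix_drop_iff_isIn pvTdTag (rest.take e)).1 ⟨i, hocc_take⟩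
      have hfind_take : PySem.Chars.find (rest.take e) pvTdTag = (i : Int) := by
        apply pvFindEq
        · exact hocc_take
        · intro j hj hocc
          exact hTmin j hj (pvOcc_of_take pvTd_ne_nil hocc).1
      have hvalsome : pvValue (rest.take e)
          = some (pvVal0 ((rest.drop (i + 21)).take g)) := by
        unfold pvValue pvVal0
        rw [if_pos hIn, hfind_take]
        have hseg : (rest.take e).drop (((i : Int)).toNat + pvTdTag.length)
            = (rest.drop (i + 21)).take g := by
          have ht : ((i : Int)).toNat + pvTdTag.length = i + 21 := by
            rw [h21]; omega
          rw [ht, List.drop_take]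
          congr 1
          omega
        rw [hseg]
      rw [List.filterMap_cons_some hvalsome,
        show rest.drop (e + 5) = rest.drop (i + 21 + g + 5) from by rw [heq]]

-- A's rebased loop = the first n elements of B's pipeline
theorem pvMain : ∀ (n : Nat) (rest : List Char),
    pvCollectB rest n = (pvF rest).take n := by
  intro n
  induction n with
  | zero => intro rest; simp [pvCollectB]
  | succ n ih =>
    intro rest
    have h21 : pvTdTag.length = 21 := by decide
    have h5 : pvEndTag.length = 5 := by decide
    simp only [pvCollectB]
    by_cases hf : PySem.Chars.find rest pvTdTag = -1
    · have hF : pvF rest = [] := by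
        apply pvF_nil rest.length rest le_rfl
        intro p q hp _ _
        exact (PySem.Chars.find_eq_neg_one_iff rest pvTdTag).1 hf (pvInfix_of_prefix_drop hp)
      simp [pvPartition, hf, hF]
    · have h0 : 0 ≤ PySem.Chars.find rest pvTdTag := by
        have := PySem.Chars.neg_one_le_find rest pvTdTag; omega
      set i : Nat := (PySem.Chars.find rest pvTdTag).toNat with hidef
      have hfi : PySem.Chars.find rest pvTdTag = (i : Int) := by omega
      obtain ⟨hTocc, hTmin⟩ := pvFindSpec rest pvTdTag i hfi
      have hpart1 : pvPartition rest pvTdTag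
          = (rest.take i, pvTdTag, rest.drop (i + pvTdTag.length)) := by
        simp [pvPartition, hfi]
      rw [hpart1]
      simp only [if_neg pvTd_ne_nil]
      by_cases hg : PySem.Chars.find (rest.drop (i + pvTdTag.length)) pvEndTag = -1
      · have hF : pvF rest = [] := by
          apply pvF_nil rest.length rest le_rfl
          intro p q hp hpq hq
          have hpi : i ≤ p := by
            by_contra h'
            exact hTmin p (by omega) hp
          have hq' : pvEndTag <+: (rest.drop (i + pvTdTag.length)).drop (q - (i + 21)) := by
            rw [pvDropDrop rest (i + pvTdTag.length) (q - (i + 21)) q (by omega)]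
            exact hq
          exact (PySem.Chars.find_eq_neg_one_iff _ pvEndTag).1 hg
            (pvInfix_of_prefix_drop hq')
        rw [hF]
        simp [pvPartition, hg]
      · have hg0 : 0 ≤ PySem.Chars.find (rest.drop (i + pvTdTag.length)) pvEndTag := by
          have := PySem.Chars.neg_one_le_find (rest.drop (i + pvTdTag.length)) pvEndTag; omega
        set g : Nat := (PySem.Chars.find (rest.drop (i + pvTdTag.length)) pvEndTag).toNat
          with hgdef
        have hgg : PySem.Chars.find (rest.drop (i + pvTdTag.length)) pvEndTag = (g : Int) := by
          omega
        have hpart2 : pvPartition (rest.drop (i + pvTdTag.length)) pvEndTag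
            = ((rest.drop (i + pvTdTag.length)).take g, pvEndTag,
               (rest.drop (i + pvTdTag.length)).drop (g + pvEndTag.length)) := by
          simp [pvPartition, hgg]
        rw [hpart2]
        simp only [if_neg pvEnd_ne_nil]
        have hfg : PySem.Chars.find (rest.drop (i + 21)) pvEndTag = (g : Int) := by
          rw [show i + 21 = i + pvTdTag.length from by rw [h21]]
          exact hgg
        rw [pvF_cons rest.length rest i g le_rfl hfi hfg, List.take_succ_cons]
        have htail : (rest.drop (i + pvTdTag.length)).drop (g + pvEndTag.length)
            = rest.drop (i + 21 + g + 5) := by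
          rw [pvDropDrop rest (i + pvTdTag.length) (g + pvEndTag.length)
            (i + 21 + g + 5) (by rw [h21, h5]; omega)]
        rw [htail, ih]
        have hhead : rest.drop (i + pvTdTag.length) = rest.drop (i + 21) := by rw [h21]
        rw [hhead]
        simp [pvVal0]

-- ===== VERDICT (by name: the statement is the Claim_ definition above) =====
theorem extract_24_values_spec : Claim_equal_extract_24_values := by
  intro html keyword _
  unfold Spec_extract_24_values extract_24_values extract_24_values_alt
  by_cases h : PySem.Chars.find html.toList keyword.toList = -1
  · simp [h]
  · have h0 : 0 ≤ PySem.Chars.find html.toList keyword.toList := by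
      have := PySem.Chars.neg_one_le_find html.toList keyword.toList; omega
    set k : Nat := (PySem.Chars.find html.toList keyword.toList).toNat with hkdef
    have hkc : PySem.Chars.find html.toList keyword.toList = (k : Int) := by omega
    have hk : k ≤ html.toList.length := by
      have := PySem.Chars.find_le_length html.toList keyword.toList; omega
    have hrest : PySem.Chars.slice html.toList (some ((k : Nat) : Int)) none
        = html.toList.drop k := by
      rw [PySem.Chars.slice_eq_listSlice, PySem.List.slice_from]
      · simp
      · omega
    have hTd : ("<TD class=\"padright\">".toList : List Char) = pvTdTag := by decide
    have hEnd : ("</TD>".toList : List Char) = pvEndTag := by decide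
    rw [if_neg h, if_neg h]
    simp only [hTd, hEnd, hkc, hrest]
    have hBvals : ((pvSplitEnd (html.toList.drop k)).dropLast.filterMap pvValue).take 24
        = pvCollectB (html.toList.drop k) 24 := by
      rw [pvMain]
      rfl
    rw [hBvals]
    obtain ⟨h1 | h1, h2, h3⟩ := pvKey 24 k html.toList hk
    · rw [h1]
    · have hlen : (pvCollectB (html.toList.drop k) 24).length + 1 ≤ 24 := by
        rw [h1] at h3; simp at h3; omega
      rw [h1, pvPad _ hlen]
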